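-- pv_equiv track=rewrite | github.com/FabioPyroDias/42PythonModule05 | ex0/stream_processor.py | process
-- ===== SOURCE A (Python) =====
-- from typing import Any, List
--
-- def process(data: Any) -> str:
--     char_index = 0
--     found_word = False
--     word_count = 0
--     while char_index < len(data):
--         if data[char_index] != ' ' and data[char_index] != '    ':
--             found_word = True
--         else:
--             if found_word:
--                 word_count += 1
--                 found_word = False
--         char_index += 1
--     if found_word:
--         word_count += 1
--     return f"Processed text: {len(data)} characters, {word_count} words"
-- ===== SOURCE B (Python) =====
-- def process(data):
--     mask = [c != ' ' for c in data]
--     non_space = sum(mask)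
--     glued = sum(a and b for a, b in zip(mask, mask[1:]))
--     return f"Processed text: {len(data)} characters, {non_space - glued} words"
-- ===== Notes on version B (the rewrite author's own statement) =====
-- stated objective: alternative
-- what changed: Replaces A's stateful while loop (found_word flag) by a counting identity: words = (#non-space chars) - (#adjacent non-space pairs), computed from a boolean mask and its shifted zip, since a run of k non-space chars has k-1 internal adjacencies.
import Mathlib
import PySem

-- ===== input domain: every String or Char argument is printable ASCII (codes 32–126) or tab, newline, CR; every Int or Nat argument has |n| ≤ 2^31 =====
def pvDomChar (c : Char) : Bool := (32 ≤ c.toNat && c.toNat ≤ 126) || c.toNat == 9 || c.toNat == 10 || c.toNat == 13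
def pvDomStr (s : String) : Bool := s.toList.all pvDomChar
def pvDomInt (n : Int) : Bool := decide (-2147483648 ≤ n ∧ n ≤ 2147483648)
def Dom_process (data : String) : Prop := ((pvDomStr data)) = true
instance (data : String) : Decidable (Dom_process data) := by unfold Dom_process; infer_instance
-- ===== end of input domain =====

-- B replaces A's stateful scan by the counting identity
-- words = (#non-space chars) - (#adjacent non-space pairs); same return value.

-- ===== PORT A =====
-- the while loop over char_index, carried state (found_word, word_count); for a string,
-- data[char_index] is a single character, so the dead comparison with '    ' is always ≠.
def processLoop : List Char → Bool → Int → Bool × Int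
  | [], foundWord, wordCount => (foundWord, wordCount)
  | c :: rest, foundWord, wordCount =>
    if c ≠ ' ' then processLoop rest true wordCount
    else if foundWord then processLoop rest false (wordCount + 1)
    else processLoop rest foundWord wordCount

def process (data : String) : String :=
  let st := processLoop data.toList false 0
  let wordCount := if st.1 then st.2 + 1 else st.2
  "Processed text: " ++ PySem.Int.toStr (PySem.Str.len data) ++ " characters, " ++
    PySem.Int.toStr wordCount ++ " words"

-- ===== PORT B =====
-- mask = [c != ' ' for c in data]; non_space = sum(mask);
-- glued = sum(a and b for a, b in zip(mask, mask[1:])); words = non_space - glued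
def process_alt (data : String) : String :=
  let mask := data.toList.map (fun c => c != ' ')
  let nonSpace := mask.foldl (fun acc b => acc + (if b then (1 : Int) else 0)) 0
  let glued := (mask.zip mask.tail).foldl
    (fun acc p => acc + (if p.1 && p.2 then (1 : Int) else 0)) 0
  "Processed text: " ++ PySem.Int.toStr (PySem.Str.len data) ++ " characters, " ++
    PySem.Int.toStr (nonSpace - glued) ++ " words"

-- ===== PRECONDITION & SPEC =====
def Spec_process (data : String) (out : String) : Prop := out = process_alt data
instance (data : String) (out : String) : Decidable (Spec_process data out) := by unfold Spec_process; infer_instance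

-- ===== CLAIM (what is proved, stated in full; the proofs are below) =====
def Claim_equal_process : Prop := ∀ (data : String), Dom_process data → Spec_process data (process data)

-- ===== LEMMAS AND PROOFS =====

/-- head-of-list is a non-space character -/
def headNS : List Char → Bool
  | [] => false
  | c :: _ => c != ' '

/-- number of maximal non-space runs (proof-side characterisation of both ports) -/
def countRuns : List Char → Int
  | [] => 0
  | [c] => if c = ' ' then 0 else 1
  | c :: d :: t =>
    (if c ≠ ' ' ∧ d = ' ' then 1 else 0) + countRuns (d :: t)

theorem countRuns_cons (c : Char) (l : List Char) :
    countRuns (c :: l) =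
      (if c == ' ' then 0 else if headNS l then 0 else 1) + countRuns l := by
  cases l with
  | nil => by_cases hc : c = ' ' <;> simp [countRuns, headNS, hc]
  | cons d t =>
    by_cases hc : c = ' ' <;> by_cases hd : d = ' ' <;>
      simp [countRuns, headNS, hc, hd]

/-- the final word count of A's loop, in terms of `countRuns` -/
theorem processLoop_eq (l : List Char) : ∀ (fw : Bool) (wc : Int),
    (if (processLoop l fw wc).1 then (processLoop l fw wc).2 + 1 else (processLoop l fw wc).2)
      = wc + countRuns l + (if fw then (if headNS l then 0 else 1) else 0) := by
  induction l with
  | nil => intro fw wc; cases fw <;> simp [processLoop, countRuns, headNS]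
  | cons c t ih =>
    intro fw wc
    by_cases hc : c = ' '
    · cases fw <;> simp [processLoop, hc, countRuns_cons, headNS, ih] <;> ring
    · cases fw <;> (simp [processLoop, hc, countRuns_cons, headNS, ih]; ring)

/-- recursive form of B's non-space sum -/
def nsSum : List Bool → Int
  | [] => 0
  | b :: t => (if b then 1 else 0) + nsSum t

/-- recursive form of B's adjacent-pair sum -/
def gluedSum : List Bool → Int
  | [] => 0
  | [_] => 0
  | b :: c :: t => (if b && c then 1 else 0) + gluedSum (c :: t)

theorem foldl_ns (l : List Bool) : ∀ (a : Int),
    l.foldl (fun acc b => acc + (if b then (1 : Int) else 0)) a = a + nsSum l := by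
  induction l with
  | nil => intro a; simp [nsSum]
  | cons b t ih => intro a; simp [List.foldl, nsSum, ih]; ring

theorem foldl_glued (l : List Bool) : ∀ (a : Int),
    (l.zip l.tail).foldl (fun acc p => acc + (if p.1 && p.2 then (1 : Int) else 0)) a
      = a + gluedSum l := by
  induction l with
  | nil => intro a; simp [gluedSum]
  | cons b t ih =>
    intro a
    cases t with
    | nil => simp [gluedSum]
    | cons c u => simp only [List.tail_cons, List.zip_cons_cons, List.foldl]
                  rw [show (c :: u).zip u = (c :: u).zip (c :: u).tail from rfl, ih]
                  simp [gluedSum]; ring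

/-- the counting identity: runs = non-space chars minus glued adjacencies -/
theorem ns_sub_glued (l : List Char) :
    nsSum (l.map (fun c => c != ' ')) - gluedSum (l.map (fun c => c != ' '))
      = countRuns l := by
  induction l with
  | nil => simp [nsSum, gluedSum, countRuns]
  | cons c t ih =>
    cases t with
    | nil => by_cases hc : c = ' ' <;> simp [nsSum, gluedSum, countRuns, hc]
    | cons d u =>
      rw [countRuns_cons]
      simp only [List.map_cons, nsSum, gluedSum, headNS] at *
      by_cases hc : c = ' ' <;> by_cases hd : d = ' '
      all_goals (simp [hc, hd] at ih ⊢; omega)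

-- ===== VERDICT (by name: the statement is the Claim_ definition above) =====
theorem process_spec : Claim_equal_process := by
  intro data _
  show _ = _
  unfold process process_alt
  have h := processLoop_eq data.toList false 0
  simp only [if_neg (by simp : ¬ false = true), add_zero, zero_add] at h
  simp only [foldl_ns, foldl_glued, zero_add, ns_sub_glued, h]
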